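-- pv_equiv track=rewrite | github.com/rgrannell1/char--align | char-align.py | filterSelections
-- ===== SOURCE A (Python) =====
-- def filterSelections (positions):
--
-- 	rows = { }
--
-- 	for row, col in positions:
--
-- 		if row in rows:
-- 			rows[row] = min(rows[row], col)
-- 		else:
-- 			rows[row] = col
--
-- 	return [(row, col) for row, col in rows.items( )]
-- ===== SOURCE B (Python) =====
-- def filterSelections(positions):
--     # Collect-then-reduce: first group all column values per row (insertion order
--     # of first appearance), then take min per group in a second pass.
--     groups = {}
--     for row, col in positions:
--         groups.setdefault(row, []).append(col)
--     return [(row, min(cols)) for row, cols in groups.items()]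
-- ===== Notes on version B (the rewrite author's own statement) =====
-- stated objective: alternative
-- what changed: A folds a running minimum into the dict inside the single loop; B first groups all column values per row into lists (setdefault/append), then aggregates with min in a separate pass over the grouped items.
import Mathlib
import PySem

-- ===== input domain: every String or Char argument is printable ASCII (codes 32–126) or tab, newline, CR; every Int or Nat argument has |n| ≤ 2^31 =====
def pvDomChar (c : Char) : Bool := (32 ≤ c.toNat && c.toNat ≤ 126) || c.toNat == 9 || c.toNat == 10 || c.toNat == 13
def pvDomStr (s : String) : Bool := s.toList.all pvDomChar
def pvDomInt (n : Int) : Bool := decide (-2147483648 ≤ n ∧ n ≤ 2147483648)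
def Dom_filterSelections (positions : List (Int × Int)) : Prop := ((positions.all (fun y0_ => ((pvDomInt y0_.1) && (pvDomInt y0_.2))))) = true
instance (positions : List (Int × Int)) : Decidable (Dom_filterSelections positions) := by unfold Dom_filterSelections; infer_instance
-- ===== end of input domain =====

-- B replaces A's in-loop running minimum with a two-pass collect-then-reduce
-- (group all columns per row, then min each group); an alternative of the same cost.


-- ===== PORT A =====
-- for row, col in positions: rows[row] = min(rows[row], col) if row in rows else col
def filterSelections (positions : List (Int × Int)) : List (Int × Int) :=
  let rows := positions.foldl
    (fun d p =>
      if d.contains p.1 then d.insert p.1 (min (d.getD p.1 0) p.2)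
      else d.insert p.1 p.2)
    (PySem.Dict.empty : PySem.Dict Int Int)
  rows.items.map (fun p => (p.1, p.2))

-- ===== PORT B =====
-- pass 1: groups.setdefault(row, []).append(col);  pass 2: (row, min(cols)) per item.
-- min(cols): cols is never empty here, so the '.getD 0' default is unreachable.
def filterSelections_alt (positions : List (Int × Int)) : List (Int × Int) :=
  let groups := positions.foldl
    (fun d p => d.modify p.1 [] (fun cs => cs ++ [p.2]))
    (PySem.Dict.empty : PySem.Dict Int (List Int))
  groups.items.map (fun p => (p.1, (PySem.List.min? p.2 (fun y => y)).getD 0))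

-- ===== PRECONDITION & SPEC =====
def Spec_filterSelections (positions : List (Int × Int)) (out : List (Int × Int)) : Prop := out = filterSelections_alt positions
instance (positions : List (Int × Int)) (out : List (Int × Int)) : Decidable (Spec_filterSelections positions out) := by unfold Spec_filterSelections; infer_instance

-- ===== CLAIM (what is proved, stated in full; the proofs are below) =====
def Claim_equal_filterSelections : Prop := ∀ (positions : List (Int × Int)), Dom_filterSelections positions → Spec_filterSelections positions (filterSelections positions)

-- ===== LEMMAS AND PROOFS =====

-- A's loop body, written as a single insert
lemma fA_eq : (fun (d : PySem.Dict Int Int) (p : Int × Int) =>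
      if d.contains p.1 then d.insert p.1 (min (d.getD p.1 0) p.2)
      else d.insert p.1 p.2)
    = (fun d p => d.insert p.1 (if d.contains p.1 then min (d.getD p.1 0) p.2 else p.2)) := by
  funext d p; split_ifs <;> rfl

-- what A's fold stores at key k: the running minimum of all columns filed under k
lemma A_get? (l : List (Int × Int)) (d : PySem.Dict Int Int) (k : Int) :
    (l.foldl (fun d p =>
        if d.contains p.1 then d.insert p.1 (min (d.getD p.1 0) p.2)
        else d.insert p.1 p.2) d).get? k
    = ((l.filter (fun p => p.1 == k)).map (fun p => p.2)).foldl
        (fun o c => some (match o with | some v => min v c | none => c)) (d.get? k) := by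
  induction l generalizing d with
  | nil => rfl
  | cons p l ih =>
    simp only [List.foldl_cons, List.filter_cons]
    by_cases hk : p.1 = k
    · have hbeq : (p.1 == k) = true := by simp [hk]
      rw [ih]
      simp only [hbeq, if_pos, List.map_cons, List.foldl_cons]
      congr 1
      subst hk
      by_cases hc : d.contains p.1
      · have hs : (d.get? p.1).isSome := by rw [← PySem.Dict.contains_eq_isSome_get?]; exact hc
        obtain ⟨v, hv⟩ := Option.isSome_iff_exists.mp hs
        rw [if_pos hc, PySem.Dict.get?_insert_self, hv]
        have : d.getD p.1 0 = v := PySem.Dict.getD_of_get?_eq_some d 0 hv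
        rw [this]
      · have hn : d.get? p.1 = none := by
          rcases h : d.get? p.1 with _ | v
          · rfl
          · exact absurd (by rw [PySem.Dict.contains_eq_isSome_get?, h]; rfl) hc
        rw [if_neg hc, PySem.Dict.get?_insert_self, hn]
    · have hbeq : (p.1 == k) = false := by simp [hk]
      rw [ih]
      simp only [hbeq, Bool.false_eq_true, if_neg, not_false_iff]
      congr 1
      split_ifs <;> exact PySem.Dict.get?_insert_of_ne _ _ (fun h => hk h.symm)

-- the running-minimum fold on options, started at some v
lemma foldl_optmin_some (t : List Int) (v : Int) :
    t.foldl (fun o c => some (match o with | some v => min v c | none => c)) (some v)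
    = some (t.foldl min v) := by
  induction t generalizing v with
  | nil => rfl
  | cons c t ih => simp [List.foldl_cons, ih]

theorem filterSelections_spec_aux (positions : List (Int × Int)) :
    filterSelections positions = filterSelections_alt positions := by
  unfold filterSelections filterSelections_alt
  simp only []
  set fA := fun (d : PySem.Dict Int Int) (p : Int × Int) =>
      if d.contains p.1 then d.insert p.1 (min (d.getD p.1 0) p.2)
      else d.insert p.1 p.2 with hfA
  set fB := fun (d : PySem.Dict Int (List Int)) (p : Int × Int) =>
      d.modify p.1 [] (fun cs => cs ++ [p.2]) with hfB
  have hkeysA : (positions.foldl fA PySem.Dict.empty).keys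
      = PySem.Set.update (PySem.Dict.empty : PySem.Dict Int Int).keys (positions.map (fun p => p.1)) := by
    rw [hfA, fA_eq]
    exact PySem.Dict.keys_foldl_insert_key positions (fun p => p.1) _ _
  have hkeysB : (positions.foldl fB PySem.Dict.empty).keys
      = PySem.Set.update (PySem.Dict.empty : PySem.Dict Int (List Int)).keys (positions.map (fun p => p.1)) := by
    exact PySem.Dict.keys_foldl_modify_key positions (fun p => p.1) [] (fun _ p => fun cs => cs ++ [p.2]) _
  have hkeys : (positions.foldl fA PySem.Dict.empty).keys = (positions.foldl fB PySem.Dict.empty).keys := by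
    rw [hkeysA, hkeysB]; simp [PySem.Dict.keys_empty]
  have hndA : (positions.foldl fA PySem.Dict.empty).keys.Nodup := by
    rw [hfA, fA_eq]
    exact PySem.Dict.nodup_keys_foldl_insert_key positions (fun p => p.1) _ _ (by simp [PySem.Dict.keys_empty])
  have hndB : (positions.foldl fB PySem.Dict.empty).keys.Nodup := by
    exact PySem.Dict.nodup_keys_foldl_modify_key positions (fun p => p.1) [] _ _ (by simp [PySem.Dict.keys_empty])
  rw [PySem.Dict.items_eq_map_keys _ hndA 0, PySem.Dict.items_eq_map_keys _ hndB []]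
  rw [← hkeys]
  rw [List.map_map, List.map_map]
  apply List.map_congr_left
  intro k hk
  simp only [Function.comp]
  congr 1
  -- value at key k on both sides
  have hBval : (positions.foldl fB PySem.Dict.empty).getD k []
      = (positions.filter (fun p => p.1 == k)).map (fun p => p.2) := by
    rw [hfB]
    have := PySem.Dict.getD_foldl_modify_append positions (PySem.Dict.empty : PySem.Dict Int (List Int)) k
    simpa [PySem.Dict.getD_empty] using this
  have hAget := A_get? positions PySem.Dict.empty k
  rw [PySem.Dict.get?_empty] at hAget
  rcases hcs : (positions.filter (fun p => p.1 == k)).map (fun p => p.2) with _ | ⟨c, t⟩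
  · -- impossible: k is a key, so its group is nonempty
    exfalso
    rw [hcs] at hAget
    simp only [List.foldl_nil] at hAget
    exact (PySem.Dict.get?_eq_none_iff_not_mem_keys _ k).mp hAget hk
  · rw [hcs] at hAget
    simp only [List.foldl_cons] at hAget
    rw [foldl_optmin_some] at hAget
    have hA : (positions.foldl fA PySem.Dict.empty).getD k 0 = t.foldl min c :=
      PySem.Dict.getD_of_get?_eq_some _ 0 hAget
    rw [hA, hBval, hcs, PySem.List.min?_id_cons]
    rfl

-- ===== VERDICT (by name: the statement is the Claim_ definition above) =====
theorem filterSelections_spec : Claim_equal_filterSelections := by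
  intro positions _
  exact filterSelections_spec_aux positions
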